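-- pv_equiv track=rewrite | github.com/Association-INTech/TechTheTurf-HighLevel | vision/aruco.py | group_by_marker_id
-- ===== SOURCE A (Python) =====
-- def group_by_marker_id(markers: tuple[tuple[int, int], ...]) -> dict[int, list[int]]:
--     result = {}
--     for marker_id, index in markers:
--         if marker_id not in result:
--             result[marker_id] = [index]
--         else:
--             result[marker_id].append(index)
--     return result
-- ===== SOURCE B (Python) =====
-- def group_by_marker_id(markers):
--     ids = list(dict.fromkeys(m for m, _ in markers))
--     return {mid: [i for m, i in markers if m == mid] for mid in ids}
-- ===== Notes on version B (the rewrite author's own statement) =====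
-- stated objective: alternative
-- what changed: B replaces A's single-pass dict-with-append accumulation by a two-phase decomposition: first dedup the marker ids in first-occurrence order, then build each group with one comprehension scan over the input per distinct id.
import Mathlib
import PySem

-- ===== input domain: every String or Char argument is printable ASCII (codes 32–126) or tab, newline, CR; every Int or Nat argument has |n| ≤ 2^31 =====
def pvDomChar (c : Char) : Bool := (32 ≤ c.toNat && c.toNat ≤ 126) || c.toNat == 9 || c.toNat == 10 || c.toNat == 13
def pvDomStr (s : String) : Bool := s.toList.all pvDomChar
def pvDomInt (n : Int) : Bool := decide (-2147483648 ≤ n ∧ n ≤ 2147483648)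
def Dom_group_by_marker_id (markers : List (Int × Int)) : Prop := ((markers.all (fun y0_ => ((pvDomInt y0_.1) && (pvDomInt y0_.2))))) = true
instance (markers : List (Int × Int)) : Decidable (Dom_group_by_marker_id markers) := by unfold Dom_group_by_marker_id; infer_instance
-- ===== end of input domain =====

-- B groups by deduping the ids first and scanning once per distinct id, instead of A's
-- single pass over a dict with in-place appends; alternative decomposition, not faster.

-- ===== PORT A =====
-- result = {}; for marker_id, index in markers: if absent insert [index] else append; return result
def group_by_marker_id (markers : List (Int × Int)) : List (Int × List Int) :=
  (markers.foldl
    (fun result p =>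
      if result.contains p.1 = false then result.insert p.1 [p.2]
      else result.modify p.1 [] (fun l => l ++ [p.2]))
    PySem.Dict.empty).items

-- ===== PORT B =====
-- ids = list(dict.fromkeys(m for m,_ in markers)); {mid: [i for m,i in markers if m==mid] for mid in ids}
def group_by_marker_id_alt (markers : List (Int × Int)) : List (Int × List Int) :=
  (PySem.List.dedup (markers.map Prod.fst)).map
    (fun mid => (mid, (markers.filter (fun q => q.1 == mid)).map Prod.snd))

-- ===== PRECONDITION & SPEC =====
def Spec_group_by_marker_id (markers : List (Int × Int)) (out : List (Int × List Int)) : Prop := out = group_by_marker_id_alt markers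
instance (markers : List (Int × Int)) (out : List (Int × List Int)) : Decidable (Spec_group_by_marker_id markers out) := by unfold Spec_group_by_marker_id; infer_instance

-- ===== CLAIM (what is proved, stated in full; the proofs are below) =====
def Claim_equal_group_by_marker_id : Prop := ∀ (markers : List (Int × Int)), Dom_group_by_marker_id markers → Spec_group_by_marker_id markers (group_by_marker_id markers)

-- ===== LEMMAS AND PROOFS =====

-- A's branching step is extensionally the uniform 'modify with default []' step.
theorem pv_step_eq (d : PySem.Dict Int (List Int)) (p : Int × Int) :
    (if d.contains p.1 = false then d.insert p.1 [p.2]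
     else d.modify p.1 [] (fun l => l ++ [p.2]))
    = d.modify p.1 [] (fun l => l ++ [p.2]) := by
  by_cases h : d.contains p.1
  · simp [h]
  · simp only [h, if_pos]
    simp [PySem.Dict.modify, PySem.Dict.getD_of_not_contains _ _ (by simpa using h)]

theorem pv_foldl_eq (markers : List (Int × Int)) (d : PySem.Dict Int (List Int)) :
    markers.foldl
      (fun result p =>
        if result.contains p.1 = false then result.insert p.1 [p.2]
        else result.modify p.1 [] (fun l => l ++ [p.2])) d
    = markers.foldl (fun result p => result.modify p.1 [] (fun l => l ++ [p.2])) d := by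
  induction markers generalizing d with
  | nil => rfl
  | cons p rest ih => rw [List.foldl_cons, List.foldl_cons, pv_step_eq]; exact ih _

-- ===== VERDICT (by name: the statement is the Claim_ definition above) =====
theorem group_by_marker_id_spec : Claim_equal_group_by_marker_id := by
  intro markers _
  unfold Spec_group_by_marker_id group_by_marker_id group_by_marker_id_alt
  rw [pv_foldl_eq]
  have hnd : (markers.foldl (fun result p => result.modify p.1 [] (fun l => l ++ [p.2]))
      PySem.Dict.empty).keys.Nodup :=
    PySem.Dict.nodup_keys_foldl_modify_key markers Prod.fst []
      (fun d x l => l ++ [x.2]) PySem.Dict.empty PySem.Dict.nodup_keys_empty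
  rw [PySem.Dict.items_eq_map_keys _ hnd []]
  rw [PySem.Dict.keys_foldl_modify_key]
  simp only [PySem.Dict.keys_empty, PySem.Set.update_nil_left, PySem.List.dedup_eq_ofList]
  apply List.map_congr_left
  intro mid _
  rw [PySem.Dict.getD_foldl_modify_append]
  simp [PySem.Dict.getD_empty]
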